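-- pv_equiv track=rewrite | github.com/zevereir/landslide | thesis_sieben_bocklandt/code/prototyping/search.py | decide_mappings
-- ===== SOURCE A (Python) =====
-- from copy import copy, deepcopy
-- from typing import Any, Dict, Set, Tuple, List, Iterable, FrozenSet, Callable
--
-- def prune_mappings(
--     S: Dict[int, Set[int]], to_check: Set[int] = None
-- ) -> Dict[int, Set[int]]:
--     """Remove trivial substitutions.
--
--     Args:
--         to_check: List of indices to start from. If not
--             given, check all.
--
--     Returns:
--         Dictionary with trivial decisions propagated.
--
--     """
--     if to_check is None:
--         to_check = S.keys()
--     while len(to_check):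
--         to_remove = set()
--         for k in to_check:
--             if len(S[k]) == 1:
--                 element = next(iter(S[k]))
--                 to_remove.add((k, element))
--         to_check = set()
--         for k, e in to_remove:
--             for i, values in S.items():
--                 if k != i:
--                     try:
--                         values.remove(e)
--                         to_check.append(i)
--                     except:
--                         pass
--     return {k: vs for k, vs in S.items() if len(vs) > 0}
--
-- def decide_mappings(S: Dict[int, Set[int]]) -> List[Dict[int, Set[int]]]:
--     """Recursively make decisions and prune.
--
--     Returns:
--         A list mappings in which each value has length 1.
--
--     """
--     # found a solution
--     if all(len(v) == 1 for v in S.values()):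
--         return [S]
--     # pick smallest node to make decision for
--     _, node = min((len(v), e) for e, v in S.items() if len(v) > 1)
--     # recursively prune for all decisions
--     solutions = list()
--     for v in S[node]:
--         # generate new dictionary
--         Sn = deepcopy(S)
--         Sn[node] = {v}
--         # prune
--         Sn = prune_mappings(Sn)
--         # go to next level
--         solutions.extend(decide_mappings(Sn))
--     return solutions
-- ===== SOURCE B (Python) =====
-- def decide_mappings(S):
--     """Iteratively make decisions and prune, using an explicit DFS stack.
--
--     Returns:
--         A list mappings in which each value has length 1.
--
--     """
--     solutions = []
--     stack = [S]
--     while stack: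
--         T = stack.pop()
--         if all(len(v) == 1 for v in T.values()):
--             solutions.append(T)
--             continue
--         # two-pass selection: smallest candidate size first, then smallest key
--         cands = [(k, len(v)) for k, v in T.items() if len(v) > 1]
--         m = min(l for _, l in cands)
--         node = min(k for k, l in cands if l == m)
--         # reverse-push so the pop order reproduces the pre-order DFS sequence
--         children = [_assign_and_prune(T, node, v) for v in T[node]]
--         stack.extend(reversed(children))
--     return solutions
--
--
-- def _assign_and_prune(T, node, v):
--     """Overwrite node with {v} and propagate singleton decisions in one pass."""
--     Tn = {k: ({v} if k == node else set(ws)) for k, ws in T.items()}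
--     sing = [(k, e) for k, ws in Tn.items() if len(ws) == 1 for e in ws]
--     out = {}
--     for i, ws in Tn.items():
--         nws = {x for x in ws if all(k == i or e != x for k, e in sing)}
--         if nws:
--             out[i] = nws
--     return out
-- ===== Notes on version B (the rewrite author's own statement) =====
-- stated objective: alternative
-- what changed: The recursive pre-order DFS is replaced by an explicit-stack worklist loop, the deepcopy+prune_mappings child step by a one-pass combined filter that removes every element pinned by another key's singleton in a single sweep, and the lexicographic min over (len, key) tuples by a two-pass selection (minimal size, then minimal key).
-- outside the precondition, e.g. on decide_mappings({0: set()}): A raises ValueError, B raises ValueError; on decide_mappings({0: {1}, 1: set()}): A raises ValueError, B raises ValueError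
import Mathlib
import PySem

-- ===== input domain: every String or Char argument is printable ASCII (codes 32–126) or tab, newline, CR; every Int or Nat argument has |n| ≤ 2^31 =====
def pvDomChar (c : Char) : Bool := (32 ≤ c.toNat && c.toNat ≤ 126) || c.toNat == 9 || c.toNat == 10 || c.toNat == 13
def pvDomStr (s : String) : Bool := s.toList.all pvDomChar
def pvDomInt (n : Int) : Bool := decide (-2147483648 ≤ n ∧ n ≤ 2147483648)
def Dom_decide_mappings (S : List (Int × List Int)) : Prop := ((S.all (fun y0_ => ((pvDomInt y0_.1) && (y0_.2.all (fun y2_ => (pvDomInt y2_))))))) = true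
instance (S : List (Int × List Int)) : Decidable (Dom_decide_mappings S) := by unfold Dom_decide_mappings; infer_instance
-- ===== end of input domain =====

-- B replaces A's recursive pre-order DFS by an explicit-stack worklist loop with a one-pass
-- combined-filter propagation step and a two-pass (size, then key) node selection; the two
-- ports return the identical solution list on Pre_. Return values only (neither Python
-- mutates its argument observably).

-- ===== PORT A =====
-- 'all(len(v) == 1 for v in S.values())'
def pvAllOnes (S : List (Int × List Int)) : Bool := S.all (fun kv => kv.2.length == 1)

-- prune_mappings with to_check = S.keys().  The Python 'while' body runs exactly once:
-- 'to_check.append(i)' raises AttributeError (sets have no append) which the bare 'except'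
-- swallows, so to_check is empty after the first pass.  One pass = collect the (key, element)
-- pairs of singleton values, remove each such element from every OTHER value, then drop
-- entries whose value became empty.  set.remove e = filter (· ≠ e) on the distinct-element
-- set encoding; next(iter(s)) = head of the encoding.
def pvPrune (S : List (Int × List Int)) : List (Int × List Int) :=
  let toRemove := S.filterMap (fun kv =>
    if kv.2.length == 1 then kv.2.head?.map (fun e => (kv.1, e)) else none)
  let S' := toRemove.foldl (fun T p =>
    T.map (fun iv => if iv.1 == p.1 then iv else (iv.1, iv.2.filter (fun x => x != p.2)))) S
  S'.filter (fun iv => 0 < iv.2.length)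

-- Python 'min' on tuples: lexicographic, first minimum wins
def pvMinPair : List (Nat × Int) → Option (Nat × Int)
  | [] => none
  | p :: t => some (t.foldl (fun b q => if q.1 < b.1 ∨ (q.1 = b.1 ∧ q.2 < b.2) then q else b) p)

-- dict lookup S[node] (first match)
def pvGet? : List (Int × List Int) → Int → Option (List Int)
  | [], _ => none
  | (a, b) :: t, k => if a == k then some b else pvGet? t k

-- 'Sn[node] = {v}' on a present key: overwrite in place
def pvSetFirst : List (Int × List Int) → Int → List Int → List (Int × List Int)
  | [], _, _ => []
  | (a, b) :: t, k, v => if a == k then (a, v) :: t else (a, b) :: pvSetFirst t k v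

-- the list of pruned child dictionaries '[prune_mappings(Sn) for v in S[node]]'.
-- The 'none' branch is where Python's min() raises ValueError (excluded by Pre_); the two
-- inner guards are pure totality guards: with distinct keys (Pre_) the chosen node is
-- present and its value has length > 1, so they never fire.
def pvChildren (S : List (Int × List Int)) : List (List (Int × List Int)) :=
  match pvMinPair (S.filterMap (fun kv =>
      if 1 < kv.2.length then some (kv.2.length, kv.1) else none)) with
  | none => []
  | some nd =>
    match pvGet? S nd.2 with
    | none => []
    | some vs =>
      if 1 < vs.length then vs.map (fun v => pvPrune (pvSetFirst S nd.2 [v])) else []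

-- fuel bound for the recursion: total number of remaining values (each decision step
-- strictly decreases it; proved below in pvChildren_meas)
def pvMeas (S : List (Int × List Int)) : Nat := (S.map (fun kv => kv.2.length)).sum

-- A's recursion, structural on a fuel parameter that is a pure totality guard
-- (fuel pvMeas S + 1 always suffices: pvChildren strictly decreases pvMeas)
def pvDmGo : Nat → List (Int × List Int) → List (List (Int × List Int))
  | 0, _ => []
  | fuel + 1, S =>
    if pvAllOnes S then [S]
    else (pvChildren S).foldl (fun acc c => acc ++ pvDmGo fuel c) []

-- A: 'decide_mappings', the recursive DFS
def decide_mappings (S : List (Int × List Int)) : List (List (Int × List Int)) :=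
  pvDmGo (pvMeas S + 1) S

-- ===== PORT B =====
-- 'all(len(v) == 1 for v in T.values())' in Source B's loop (B-side transliteration)
def pvAltAllOnes (T : List (Int × List Int)) : Bool := T.all (fun kv => kv.2.length == 1)

-- Source B's '_assign_and_prune(T, node, v)': dict comprehension overwriting node with {v},
-- then the one-pass combined filter 'all(k == i or e != x for k, e in sing)', dropping
-- entries whose value became empty.
def pvAltAssignPrune (T : List (Int × List Int)) (node : Int) (v : Int) :
    List (Int × List Int) :=
  let Tn := T.map (fun kv => if kv.1 == node then (kv.1, [v]) else kv)
  let sing := Tn.flatMap (fun kv =>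
    if kv.2.length == 1 then kv.2.map (fun e => (kv.1, e)) else [])
  Tn.filterMap (fun iv =>
    let nws := iv.2.filter (fun x => sing.all (fun p => p.1 == iv.1 || p.2 != x))
    if nws.isEmpty then none else some (iv.1, nws))

-- Source B's loop body below the solution test: cands, m = min(…), node = min(…), children.
-- min() on an empty generator raises ValueError: the 'none' branches (excluded by Pre_);
-- the lookup 'T[node]' is List.lookup (first match).
def pvAltChildren (T : List (Int × List Int)) : List (List (Int × List Int)) :=
  let cands := T.filterMap (fun kv =>
    if 1 < kv.2.length then some (kv.1, kv.2.length) else none)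
  match PySem.List.min? (cands.map Prod.snd) (fun x => x) with
  | none => []
  | some m =>
    match PySem.List.min? ((cands.filter (fun p => p.2 == m)).map Prod.fst) (fun x => x) with
    | none => []
    | some node =>
      match List.lookup node T with
      | none => []
      | some vs => vs.map (fun v => pvAltAssignPrune T node v)

-- fuel bound for the worklist loop: Σ 3^pvMeas over the stack strictly decreases at every
-- iteration (proved below), so it bounds the number of iterations
def pvMeas3 (st : List (List (Int × List Int))) : Nat := (st.map (fun S => 3 ^ pvMeas S)).sum

-- Source B's 'while stack' worklist.  The Lean stack keeps the top at the HEAD, so Python's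
-- 'stack.extend(reversed(children)); … stack.pop()' is 'pvAltChildren T ++ rest' here.
-- The fuel is a pure totality guard; pvMeas3 of the initial stack always suffices.
def pvDfsLoopGo : Nat → List (List (Int × List Int)) → List (List (Int × List Int)) → List (List (Int × List Int))
  | _, [], acc => acc
  | 0, _ :: _, acc => acc
  | fuel + 1, T :: rest, acc =>
    if pvAltAllOnes T then pvDfsLoopGo fuel rest (acc ++ [T])
    else pvDfsLoopGo fuel (pvAltChildren T ++ rest) acc

def decide_mappings_alt (S : List (Int × List Int)) : List (List (Int × List Int)) :=
  pvDfsLoopGo (pvMeas3 [S]) [S] []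

-- ===== PRECONDITION & SPEC =====
-- Pre_ excludes (a) inputs on which Python A raises ValueError (min() of an empty sequence:
-- some value is empty while no value has more than one element), and (b) association lists
-- that are not valid encodings of A's dict-of-sets argument (duplicate keys, or duplicate
-- elements inside a value), on which the list cannot be passed to the Python faithfully.
def Pre_decide_mappings (S : List (Int × List Int)) : Prop :=
  (S.map Prod.fst).Nodup ∧ (∀ kv ∈ S, kv.2.Nodup) ∧
  ((∀ kv ∈ S, kv.2 ≠ []) ∨ (∃ kv ∈ S, 1 < kv.2.length))
instance (S : List (Int × List Int)) : Decidable (Pre_decide_mappings S) := by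
  unfold Pre_decide_mappings; infer_instance

def pvWitness_decide_mappings : (List (Int × List Int)) := [(0, [1, 2]), (1, [1])]

def Spec_decide_mappings (S : List (Int × List Int)) (out : List (List (Int × List Int))) : Prop := out = decide_mappings_alt S
instance (S : List (Int × List Int)) (out : List (List (Int × List Int))) : Decidable (Spec_decide_mappings S out) := by unfold Spec_decide_mappings; infer_instance

-- ===== CLAIM (what is proved, stated in full; the proofs are below) =====
def Claim_equal_decide_mappings : Prop := ∀ (S : List (Int × List Int)), Dom_decide_mappings S → Pre_decide_mappings S → Spec_decide_mappings S (decide_mappings S)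

-- ===== LEMMAS AND PROOFS =====

-- interchange of the two (identical) solution tests
theorem pvAllOnes_eq (T : List (Int × List Int)) : pvAltAllOnes T = pvAllOnes T := rfl

-- ---- keys bookkeeping ----

theorem pvKeys_setFirst (S : List (Int × List Int)) (k : Int) (v : List Int) :
    (pvSetFirst S k v).map Prod.fst = S.map Prod.fst := by
  induction S with
  | nil => rfl
  | cons a t ih =>
    obtain ⟨a1, a2⟩ := a
    by_cases h : a1 == k <;> simp [pvSetFirst, h, ih]

theorem pvKeys_foldl_step (L : List (Int × Int)) (T : List (Int × List Int)) :
    ((L.foldl (fun T p =>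
        T.map (fun iv => if iv.1 == p.1 then iv else (iv.1, iv.2.filter (fun x => x != p.2)))) T).map
      Prod.fst) = T.map Prod.fst := by
  induction L generalizing T with
  | nil => rfl
  | cons p L ih =>
    simp only [List.foldl_cons, ih, List.map_map]
    apply List.map_congr_left
    intro iv _
    by_cases h : iv.1 == p.1
    · simp only [Function.comp_apply, h, if_true]
    · simp only [Function.comp_apply, h, Bool.false_eq_true, if_false]

theorem pvKeys_prune_sublist (S : List (Int × List Int)) :
    ((pvPrune S).map Prod.fst).Sublist (S.map Prod.fst) := by
  unfold pvPrune
  have h := (List.filter_sublist (l := ((S.filterMap (fun kv =>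
    if kv.2.length == 1 then kv.2.head?.map (fun e => (kv.1, e)) else none)).foldl (fun T p =>
      T.map (fun iv => if iv.1 == p.1 then iv else (iv.1, iv.2.filter (fun x => x != p.2)))) S))
    (p := fun iv => 0 < iv.2.length)).map Prod.fst
  rwa [pvKeys_foldl_step] at h

theorem pvNodup_child {S c : List (Int × List Int)} (h : (S.map Prod.fst).Nodup)
    (hc : c ∈ pvChildren S) : (c.map Prod.fst).Nodup := by
  unfold pvChildren at hc
  split at hc
  · simp at hc
  · rename_i nd _
    split at hc
    · simp at hc
    · split at hc
      · simp only [List.mem_map] at hc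
        obtain ⟨v, _, rfl⟩ := hc
        have h1 := pvKeys_prune_sublist (pvSetFirst S nd.2 [v])
        rw [pvKeys_setFirst] at h1
        exact h.sublist h1
      · simp at hc

-- ---- prune: A's per-pair removal fold equals B's one-pass combined filter ----

theorem pvFoldl_step_eq (L : List (Int × Int)) (T : List (Int × List Int)) :
    L.foldl (fun T p =>
        T.map (fun iv => if iv.1 == p.1 then iv else (iv.1, iv.2.filter (fun x => x != p.2)))) T
      = T.map (fun iv => (iv.1, iv.2.filter (fun x => L.all (fun p => p.1 == iv.1 || x != p.2)))) := by
  induction L generalizing T with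
  | nil => simp
  | cons p L ih =>
    simp only [List.foldl_cons, ih, List.map_map]
    apply List.map_congr_left
    intro iv _
    by_cases h : iv.1 == p.1
    · have h' : (p.1 == iv.1) = true := by rwa [Bool.beq_comm] at h
      simp only [Function.comp_apply, h, if_true, List.all_cons, h', Bool.true_or,
        Bool.true_and]
    · simp only [Bool.not_eq_true] at h
      have h' : (p.1 == iv.1) = false := by rwa [Bool.beq_comm] at h
      simp only [Function.comp_apply, h, Bool.false_eq_true, if_false, List.filter_filter,
        List.all_cons, h', Bool.false_or]
      refine congrArg _ ?_
      apply List.filter_congr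
      intro x _
      exact Bool.and_comm _ _

theorem pvSingles_eq (T : List (Int × List Int)) :
    T.filterMap (fun kv =>
        if kv.2.length == 1 then kv.2.head?.map (fun e => (kv.1, e)) else none)
      = T.flatMap (fun kv =>
        if kv.2.length == 1 then kv.2.map (fun e => (kv.1, e)) else []) := by
  induction T with
  | nil => rfl
  | cons a t ih =>
    obtain ⟨a1, a2⟩ := a
    match a2 with
    | [] => simpa using ih
    | [e] => simpa using ih
    | e :: e' :: r =>
      have hlen : ((e :: e' :: r).length == 1) = false := by simp
      simpa [hlen] using ih

-- 'if the filtered value is nonempty keep it' : filter-after-map = filterMap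
theorem pvFilterMap_eq (T : List (Int × List Int)) (f : (Int × List Int) → List Int) :
    (T.map (fun iv => (iv.1, f iv))).filter (fun iv => 0 < iv.2.length)
      = T.filterMap (fun iv => if (f iv).isEmpty then none else some (iv.1, f iv)) := by
  induction T with
  | nil => rfl
  | cons a t ih =>
    simp only [List.map_cons, List.filter_cons, List.filterMap_cons]
    by_cases h : f a = []
    · have h1 : (f a).isEmpty = true := by simpa [List.isEmpty_iff]
      have h2 : (decide (0 < ((a.1, f a) : Int × List Int).2.length)) = false := by simp [h]
      simp [h1, h2, ih]
    · have h1 : ((f a).isEmpty) = false := by simpa [List.isEmpty_iff] using h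
      have h2 : (decide (0 < ((a.1, f a) : Int × List Int).2.length)) = true := by
        simpa using List.length_pos_iff.mpr h
      simp [h1, h2, ih]

theorem pvBne_swap (a b : Int) : (a != b) = (b != a) := by
  simp [bne, Bool.beq_comm]

theorem pvAltAssignPrune_eq (T : List (Int × List Int)) (node v : Int) :
    pvAltAssignPrune T node v
      = pvPrune (T.map (fun kv => if kv.1 == node then (kv.1, [v]) else kv)) := by
  unfold pvAltAssignPrune pvPrune
  simp only [pvSingles_eq, pvFoldl_step_eq, pvFilterMap_eq, pvBne_swap]

theorem pvMap_id_of_no_key {t : List (Int × List Int)} {k : Int} {v : List Int}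
    (h : ∀ kv ∈ t, (kv.1 == k) = false) :
    t.map (fun kv => if kv.1 == k then (kv.1, v) else kv) = t := by
  conv_rhs => rw [← List.map_id t]
  apply List.map_congr_left
  intro kv hkv
  simp [h kv hkv]

theorem pvSetFirst_eq_map {S : List (Int × List Int)} (h : (S.map Prod.fst).Nodup)
    (k : Int) (v : List Int) :
    pvSetFirst S k v = S.map (fun kv => if kv.1 == k then (kv.1, v) else kv) := by
  induction S with
  | nil => rfl
  | cons a t ih =>
    obtain ⟨a1, a2⟩ := a
    simp only [List.map_cons, List.nodup_cons] at h
    by_cases hk : a1 == k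
    · have ha : a1 = k := by simpa using hk
      have hno : ∀ kv ∈ t, (kv.1 == k) = false := by
        intro kv hkv
        have hne : kv.1 ≠ k := by
          intro he
          exact h.1 (by rw [ha, ← he]; exact List.mem_map_of_mem hkv)
        simpa using hne
      simp only [pvSetFirst, hk, if_true, List.map_cons, pvMap_id_of_no_key hno]
    · simp only [pvSetFirst, hk, Bool.false_eq_true, if_false, List.map_cons, ih h.2]

-- ---- minimum: A's lexicographic fold = B's two-pass (size, then key) selection ----

def pvLexLe (q p : Nat × Int) : Prop := q.1 < p.1 ∨ (q.1 = p.1 ∧ q.2 ≤ p.2)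

theorem pvLexLe_antisymm {q p : Nat × Int} (h1 : pvLexLe q p) (h2 : pvLexLe p q) : q = p := by
  obtain ⟨q1, q2⟩ := q; obtain ⟨p1, p2⟩ := p
  unfold pvLexLe at h1 h2
  simp only [Prod.mk.injEq]
  constructor <;> omega

theorem pvFoldl_min_spec (t : List (Nat × Int)) (b : Nat × Int) :
    (t.foldl (fun b q => if q.1 < b.1 ∨ (q.1 = b.1 ∧ q.2 < b.2) then q else b) b = b ∨
      t.foldl (fun b q => if q.1 < b.1 ∨ (q.1 = b.1 ∧ q.2 < b.2) then q else b) b ∈ t) ∧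
    pvLexLe (t.foldl (fun b q => if q.1 < b.1 ∨ (q.1 = b.1 ∧ q.2 < b.2) then q else b) b) b ∧
    ∀ p ∈ t, pvLexLe (t.foldl (fun b q => if q.1 < b.1 ∨ (q.1 = b.1 ∧ q.2 < b.2) then q else b) b) p := by
  induction t generalizing b with
  | nil => exact ⟨Or.inl rfl, Or.inr ⟨rfl, le_refl _⟩, by simp⟩
  | cons p t ih =>
    simp only [List.foldl_cons]
    obtain ⟨hmem, hle, hall⟩ := ih (if p.1 < b.1 ∨ (p.1 = b.1 ∧ p.2 < b.2) then p else b)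
    have hfb : pvLexLe (if p.1 < b.1 ∨ (p.1 = b.1 ∧ p.2 < b.2) then p else b) b ∧
        pvLexLe (if p.1 < b.1 ∨ (p.1 = b.1 ∧ p.2 < b.2) then p else b) p := by
      unfold pvLexLe; split_ifs with h
      · exact ⟨by omega, by omega⟩
      · exact ⟨by omega, by omega⟩
    have htrans : ∀ {x y z : Nat × Int}, pvLexLe x y → pvLexLe y z → pvLexLe x z := by
      intro x y z h1 h2; unfold pvLexLe at *; omega
    refine ⟨?_, htrans hle hfb.1, ?_⟩
    · rcases hmem with h | h
      · rw [h]; split_ifs with hc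
        · exact Or.inr (List.mem_cons_self)
        · exact Or.inl rfl
      · exact Or.inr (List.mem_cons_of_mem _ h)
    · intro q hq
      rcases List.mem_cons.mp hq with rfl | hq
      · exact htrans hle hfb.2
      · exact hall q hq

theorem pvMinPair_spec {M : List (Nat × Int)} {q : Nat × Int} (h : pvMinPair M = some q) :
    q ∈ M ∧ ∀ p ∈ M, pvLexLe q p := by
  match M with
  | [] => simp [pvMinPair] at h
  | p :: t =>
    simp only [pvMinPair, Option.some.injEq] at h
    obtain ⟨hmem, hle, hall⟩ := pvFoldl_min_spec t p
    subst h
    refine ⟨?_, ?_⟩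
    · rcases hmem with h | h
      · rw [h]; exact List.mem_cons_self
      · exact List.mem_cons_of_mem _ h
    · intro r hr
      rcases List.mem_cons.mp hr with rfl | hr
      · exact hle
      · exact hall r hr

-- A's candidate list is B's candidate list with the pair components swapped
theorem pvM_eq_swap (S : List (Int × List Int)) :
    S.filterMap (fun kv => if 1 < kv.2.length then some (kv.2.length, kv.1) else none)
      = (S.filterMap (fun kv => if 1 < kv.2.length then some (kv.1, kv.2.length) else none)).map
          (fun p => (p.2, p.1)) := by
  induction S with
  | nil => rfl
  | cons a t ih =>
    by_cases h : 1 < a.2.length <;> simp [h, ih]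

-- ---- dict lookup ----

theorem pvGet?_eq_lookup (S : List (Int × List Int)) (k : Int) :
    pvGet? S k = List.lookup k S := by
  induction S with
  | nil => rfl
  | cons a t ih =>
    obtain ⟨a1, a2⟩ := a
    by_cases h : a1 == k
    · have h' : (k == a1) = true := by rwa [Bool.beq_comm] at h
      simp [pvGet?, List.lookup, h, h']
    · simp only [Bool.not_eq_true] at h
      have h' : (k == a1) = false := by rwa [Bool.beq_comm] at h
      simp [pvGet?, List.lookup, h, h', ih]

theorem pvLookup_nodup {S : List (Int × List Int)} {k : Int} {vs : List Int}
    (h : (S.map Prod.fst).Nodup) (hmem : (k, vs) ∈ S) : List.lookup k S = some vs := by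
  induction S with
  | nil => simp at hmem
  | cons a t ih =>
    obtain ⟨a1, a2⟩ := a
    simp only [List.map_cons, List.nodup_cons] at h
    rcases List.mem_cons.mp hmem with he | hmem'
    · injection he with h1 h2
      subst h1; subst h2
      simp [List.lookup]
    · have hne : (k == a1) = false := by
        have hkk : k ≠ a1 := by
          intro he
          exact h.1 (by rw [← he]; exact List.mem_map_of_mem hmem')
        simpa using hkk
      simp [List.lookup, hne, ih h.2 hmem']

theorem pvChildren_eq_alt {S : List (Int × List Int)} (h : (S.map Prod.fst).Nodup) :
    pvChildren S = pvAltChildren S := by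
  unfold pvChildren pvAltChildren
  rw [pvM_eq_swap S]
  rcases hcnil : S.filterMap (fun kv => if 1 < kv.2.length then some (kv.1, kv.2.length) else none)
    with _ | ⟨c0, ct⟩
  · rw [hcnil]
    simp [pvMinPair, PySem.List.min?]
  · rw [hcnil]
    -- B's first pass: the minimal candidate size m
    obtain ⟨m, hm⟩ : ∃ m, PySem.List.min? ((c0 :: ct).map Prod.snd) (fun x => x) = some m := by
      rcases he : PySem.List.min? ((c0 :: ct).map Prod.snd) (fun x => x) with _ | m
      · rw [PySem.List.min?_eq_none_iff] at he; simp at he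
      · exact ⟨m, rfl⟩
    have hm_mem : m ∈ (c0 :: ct).map Prod.snd := PySem.List.min?_mem hm
    have hm_min : ∀ y ∈ (c0 :: ct).map Prod.snd, m ≤ y := fun y hy => PySem.List.min?_isMin hm y hy
    -- B's second pass: the minimal key node among candidates of size m
    obtain ⟨cm, hcm_mem, hcm2⟩ := List.mem_map.mp hm_mem
    obtain ⟨node, hnode⟩ : ∃ node,
        PySem.List.min? (((c0 :: ct).filter (fun p => p.2 == m)).map Prod.fst) (fun x => x)
          = some node := by
      rcases he : PySem.List.min? (((c0 :: ct).filter (fun p => p.2 == m)).map Prod.fst)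
          (fun x => x) with _ | node
      · rw [PySem.List.min?_eq_none_iff] at he
        simp only [List.map_eq_nil_iff, List.filter_eq_nil_iff] at he
        exact absurd (by simpa using hcm2) (by simpa using he cm hcm_mem)
      · exact ⟨node, he⟩
    have hnode_mem : node ∈ ((c0 :: ct).filter (fun p => p.2 == m)).map Prod.fst :=
      PySem.List.min?_mem hnode
    have hnode_min : ∀ y ∈ ((c0 :: ct).filter (fun p => p.2 == m)).map Prod.fst, node ≤ y :=
      fun y hy => PySem.List.min?_isMin hnode y hy
    -- A's lexicographic minimum equals (m, node)
    obtain ⟨q, hq⟩ : ∃ q, pvMinPair ((c0 :: ct).map (fun p => (p.2, p.1))) = some q := by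
      rw [List.map_cons]
      exact ⟨_, rfl⟩
    obtain ⟨hq_mem, hq_min⟩ := pvMinPair_spec hq
    have hmn_mem : ((m, node) : Nat × Int) ∈ (c0 :: ct).map (fun p => (p.2, p.1)) := by
      obtain ⟨cn, hcn_mem, hcn1⟩ := List.mem_map.mp hnode_mem
      obtain ⟨hcn_c, hcn2⟩ := List.mem_filter.mp hcn_mem
      refine List.mem_map.mpr ⟨cn, hcn_c, ?_⟩
      simp only [Prod.mk.injEq]
      exact ⟨by simpa using hcn2, hcn1⟩
    have hmn_min : ∀ p ∈ (c0 :: ct).map (fun p => (p.2, p.1)), pvLexLe (m, node) p := by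
      intro p hp
      obtain ⟨c, hc_mem, rfl⟩ := List.mem_map.mp hp
      have h1 : m ≤ c.2 := hm_min c.2 (List.mem_map_of_mem hc_mem)
      rcases Nat.lt_or_ge m c.2 with hlt | hge
      · exact Or.inl hlt
      · have hme : c.2 = m := by omega
        have h2 : node ≤ c.1 := by
          refine hnode_min c.1 (List.mem_map.mpr ⟨c, List.mem_filter.mpr ⟨hc_mem, ?_⟩, rfl⟩)
          simpa using hme
        exact Or.inr ⟨hme.symm, h2⟩
    have hq_eq : q = (m, node) :=
      pvLexLe_antisymm (hq_min _ hmn_mem) (hmn_min _ hq_mem)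
    -- both sides now look up the value of node, of size m > 1
    obtain ⟨cn, hcn_mem, hcn1⟩ := List.mem_map.mp hnode_mem
    obtain ⟨hcn_c, hcn2⟩ := List.mem_filter.mp hcn_mem
    have hcn_cands : cn ∈ S.filterMap
        (fun kv => if 1 < kv.2.length then some (kv.1, kv.2.length) else none) := by
      rw [hcnil]; exact hcn_c
    obtain ⟨kv, hkv_mem, hkv_eq⟩ := List.mem_filterMap.mp hcn_cands
    have hkv_len : 1 < kv.2.length := by
      by_contra hn
      simp [hn] at hkv_eq
    have hkv_eq' : cn = (kv.1, kv.2.length) := by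
      simp only [hkv_len, if_true, Option.some.injEq] at hkv_eq
      exact hkv_eq.symm
    have hkv1 : kv.1 = node := by rw [hkv_eq'] at hcn1; exact hcn1
    have hkv2 : kv.2.length = m := by
      rw [hkv_eq'] at hcn2; simpa using hcn2
    have hlook : List.lookup node S = some kv.2 := by
      apply pvLookup_nodup h
      rw [← hkv1]
      exact hkv_mem
    rw [hq, hq_eq]
    simp only [hm, hnode, pvGet?_eq_lookup, hlook]
    rw [if_pos (by omega)]
    apply List.map_congr_left
    intro v _
    rw [pvAltAssignPrune_eq, pvSetFirst_eq_map h]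

-- ---- measure lemmas (termination of both fuelled transliterations) ----

theorem pvMeas_filter_le (S : List (Int × List Int)) (p : Int × List Int → Bool) :
    pvMeas (S.filter p) ≤ pvMeas S := by
  induction S with
  | nil => simp [pvMeas]
  | cons a t ih =>
    simp only [List.filter_cons]
    split <;> simp only [pvMeas, List.map_cons, List.sum_cons] at * <;> omega

theorem pvMeas_shrinkMap_le (S : List (Int × List Int)) (p : Int × Int) :
    pvMeas (S.map (fun iv => if iv.1 == p.1 then iv else (iv.1, iv.2.filter (fun x => x != p.2))))
      ≤ pvMeas S := by
  induction S with
  | nil => simp [pvMeas]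
  | cons a t ih =>
    simp only [List.map_cons, pvMeas, List.sum_cons] at *
    have h1 : (if a.1 == p.1 then a else (a.1, a.2.filter (fun x => x != p.2))).2.length
        ≤ a.2.length := by
      split
      · exact le_refl _
      · exact List.length_filter_le _ _
    omega

theorem pvMeas_prune_le (S : List (Int × List Int)) : pvMeas (pvPrune S) ≤ pvMeas S := by
  unfold pvPrune
  refine le_trans (pvMeas_filter_le _ _) ?_
  generalize (S.filterMap _) = l
  induction l generalizing S with
  | nil => simp
  | cons p t ih => exact le_trans (ih _) (pvMeas_shrinkMap_le _ _)

theorem pvMeas_setFirst (S : List (Int × List Int)) (k : Int) (vs : List Int) (v : Int)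
    (h : pvGet? S k = some vs) : pvMeas (pvSetFirst S k [v]) + vs.length = pvMeas S + 1 := by
  induction S with
  | nil => simp [pvGet?] at h
  | cons a t ih =>
    obtain ⟨a1, a2⟩ := a
    by_cases hk : a1 == k
    · simp only [pvGet?, hk, if_true] at h
      obtain rfl : a2 = vs := by simpa using h
      simp only [pvSetFirst, hk, if_true, pvMeas, List.map_cons, List.sum_cons,
        List.length_cons, List.length_nil]
      omega
    · simp only [pvGet?, hk, Bool.false_eq_true, if_false] at h
      have := ih h
      simp only [pvSetFirst, hk, Bool.false_eq_true, if_false, pvMeas, List.map_cons,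
        List.sum_cons] at *
      omega

theorem pvGet?_length_le (S : List (Int × List Int)) (k : Int) (vs : List Int)
    (h : pvGet? S k = some vs) : vs.length ≤ pvMeas S := by
  induction S with
  | nil => simp [pvGet?] at h
  | cons a t ih =>
    obtain ⟨a1, a2⟩ := a
    by_cases hk : a1 == k
    · simp only [pvGet?, hk, if_true] at h
      obtain rfl : a2 = vs := by simpa using h
      simp only [pvMeas, List.map_cons, List.sum_cons]
      omega
    · simp only [pvGet?, hk, Bool.false_eq_true, if_false] at h
      have := ih h
      simp only [pvMeas, List.map_cons, List.sum_cons] at *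
      omega

theorem pvChildren_meas {c S : List (Int × List Int)} (hc : c ∈ pvChildren S) :
    pvMeas c < pvMeas S := by
  unfold pvChildren at hc
  split at hc
  · simp at hc
  · rename_i nd _
    split at hc
    · simp at hc
    · rename_i vs hvs
      split at hc
      · rename_i hlen
        simp only [List.mem_map] at hc
        obtain ⟨v, _, rfl⟩ := hc
        have h1 := pvMeas_prune_le (pvSetFirst S nd.2 [v])
        have h2 := pvMeas_setFirst S nd.2 vs v hvs
        omega
      · simp at hc

theorem pv_three_mul_lt_pow (L : Nat) (h : 2 ≤ L) : 3 * L < 3 ^ L := by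
  induction L with
  | zero => omega
  | succ n ih =>
    rcases Nat.lt_or_ge n 2 with hn | hn
    · interval_cases n
      · omega
      · norm_num
    · have := ih hn
      have h1 : 3 ^ n ≥ 9 := by
        calc 3 ^ n ≥ 3 ^ 2 := Nat.pow_le_pow_right (by omega) hn
        _ = 9 := by norm_num
      simp only [pow_succ]
      omega

theorem pvChildren_meas3 (S : List (Int × List Int)) :
    pvMeas3 (pvChildren S) < 3 ^ pvMeas S := by
  have hpos : 0 < 3 ^ pvMeas S := pow_pos (by norm_num : (0:Nat) < 3) _
  unfold pvChildren
  split
  · simp [pvMeas3]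
  · rename_i nd _
    split
    · simp [pvMeas3]
    · rename_i vs hvs
      split
      · rename_i hlen
        set L := vs.length with hL
        have hLm : L ≤ pvMeas S := pvGet?_length_le S nd.2 vs hvs
        obtain ⟨d, hd⟩ : ∃ d, pvMeas S = L + d := ⟨pvMeas S - L, by omega⟩
        have hbound : ∀ v ∈ vs, 3 ^ pvMeas (pvPrune (pvSetFirst S nd.2 [v])) ≤ 3 ^ (d + 1) := by
          intro v _
          apply Nat.pow_le_pow_right (by omega)
          have h1 := pvMeas_prune_le (pvSetFirst S nd.2 [v])
          have h2 := pvMeas_setFirst S nd.2 vs v hvs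
          omega
        have hsum : pvMeas3 (vs.map (fun v => pvPrune (pvSetFirst S nd.2 [v]))) ≤ L * 3 ^ (d + 1) := by
          unfold pvMeas3
          rw [List.map_map]
          have hle : ∀ x ∈ vs.map (fun v => 3 ^ pvMeas (pvPrune (pvSetFirst S nd.2 [v]))),
              x ≤ 3 ^ (d + 1) := by
            intro x hx
            obtain ⟨v, hv, hxe⟩ := List.mem_map.mp hx
            exact hxe ▸ hbound v hv
          calc ((vs.map fun v => 3 ^ pvMeas (pvPrune (pvSetFirst S nd.2 [v]))).sum)
              ≤ (vs.map (fun v => 3 ^ pvMeas (pvPrune (pvSetFirst S nd.2 [v])))).length * 3 ^ (d + 1) :=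
                List.sum_le_card_nsmul _ _ hle
            _ = L * 3 ^ (d + 1) := by simp [hL]
        have hlt : L * 3 ^ (d + 1) < 3 ^ (L + d) := by
          have h3 : 3 * L < 3 ^ L := pv_three_mul_lt_pow L hlen
          calc L * 3 ^ (d + 1) = 3 * L * 3 ^ d := by ring
            _ < 3 ^ L * 3 ^ d := by
                exact (Nat.mul_lt_mul_right (pow_pos (by norm_num : (0:Nat) < 3) _)).mpr h3
            _ = 3 ^ (L + d) := (pow_add 3 L d).symm
        rw [hd]
        exact lt_of_le_of_lt hsum hlt
      · simp [pvMeas3]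

theorem pv_foldl_append_flatMap (l : List (List (Int × List Int)))
    (f : List (Int × List Int) → List (List (Int × List Int)))
    (acc : List (List (Int × List Int))) :
    l.foldl (fun a c => a ++ f c) acc = acc ++ l.flatMap f := by
  induction l generalizing acc with
  | nil => simp
  | cons x t ih =>
    simp only [List.foldl_cons, List.flatMap_cons, ih]
    simp

-- fuel irrelevance: any fuel strictly above pvMeas S computes A's DFS
theorem pvDmGo_congr : ∀ n : Nat, ∀ S : List (Int × List Int), ∀ f f' : Nat,
    pvMeas S ≤ n → pvMeas S < f → pvMeas S < f' → pvDmGo f S = pvDmGo f' S := by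
  intro n
  induction n using Nat.strong_induction_on with
  | _ n ih =>
    intro S f f' hn hf hf'
    match f, f' with
    | f + 1, f' + 1 =>
      simp only [pvDmGo]
      split
      · rfl
      · rw [pv_foldl_append_flatMap, pv_foldl_append_flatMap]
        congr 1
        apply List.flatMap_congr
        intro c hc
        have hcm := pvChildren_meas hc
        exact ih (pvMeas c) (by omega) c f f' (le_refl _) (by omega) (by omega)

theorem pvDm_eq_go {S : List (Int × List Int)} {f : Nat} (hf : pvMeas S < f) :
    pvDmGo f S = decide_mappings S :=
  pvDmGo_congr (pvMeas S) S f (pvMeas S + 1) (le_refl _) hf (by omega)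

theorem pvDm_ones {S : List (Int × List Int)} (h : pvAllOnes S = true) :
    decide_mappings S = [S] := by
  unfold decide_mappings pvDmGo
  simp [h]

theorem pvDm_else {S : List (Int × List Int)} (h : ¬ pvAllOnes S = true) :
    decide_mappings S = (pvChildren S).flatMap decide_mappings := by
  conv_lhs => unfold decide_mappings pvDmGo
  simp only [h]
  rw [pv_foldl_append_flatMap]
  simp only [List.nil_append]
  apply List.flatMap_congr
  intro c hc
  exact pvDm_eq_go (by have := pvChildren_meas hc; omega)

-- ---- B's worklist loop drains the stack into A's pre-order DFS output ----

theorem pvLoop_spec : ∀ f : Nat, ∀ stack acc, pvMeas3 stack ≤ f →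
    (∀ T ∈ stack, (T.map Prod.fst).Nodup) →
    pvDfsLoopGo f stack acc = acc ++ stack.flatMap decide_mappings := by
  intro f
  induction f using Nat.strong_induction_on with
  | _ f ih =>
    intro stack acc hm hnd
    match f, stack with
    | f, [] => simp [pvDfsLoopGo]
    | 0, S :: rest =>
      exfalso
      have : 0 < 3 ^ pvMeas S := pow_pos (by norm_num : (0:Nat) < 3) _
      simp only [pvMeas3, List.map_cons, List.sum_cons] at hm
      omega
    | f + 1, S :: rest =>
      have hndS : (S.map Prod.fst).Nodup := hnd S List.mem_cons_self
      have hndrest : ∀ T ∈ rest, (T.map Prod.fst).Nodup :=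
        fun T hT => hnd T (List.mem_cons_of_mem _ hT)
      have hrest : pvMeas3 rest ≤ f := by
        have : 0 < 3 ^ pvMeas S := pow_pos (by norm_num : (0:Nat) < 3) _
        simp only [pvMeas3, List.map_cons, List.sum_cons] at hm
        simp only [pvMeas3]
        omega
      simp only [pvDfsLoopGo, pvAllOnes_eq]
      split
      · rename_i h
        rw [ih f (by omega) rest (acc ++ [S]) hrest hndrest]
        simp [List.flatMap_cons, pvDm_ones h]
      · rename_i h
        rw [← pvChildren_eq_alt hndS]
        have hch : pvMeas3 (pvChildren S ++ rest) ≤ f := by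
          have h1 := pvChildren_meas3 S
          simp only [pvMeas3, List.map_cons, List.sum_cons, List.map_append,
            List.sum_append] at hm ⊢
          simp only [pvMeas3] at h1
          omega
        have hndch : ∀ T ∈ pvChildren S ++ rest, (T.map Prod.fst).Nodup := by
          intro T hT
          rcases List.mem_append.mp hT with hT | hT
          · exact pvNodup_child hndS hT
          · exact hndrest T hT
        rw [ih f (by omega) _ acc hch hndch]
        simp [List.flatMap_cons, List.flatMap_append, pvDm_else h]

-- ===== VERDICT (by name: the statement is the Claim_ definition above) =====
theorem decide_mappings_spec : Claim_equal_decide_mappings := by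
  intro S _ hPre
  unfold Spec_decide_mappings decide_mappings_alt
  rw [pvLoop_spec (pvMeas3 [S]) [S] [] (le_refl _)
    (by intro T hT; simp only [List.mem_singleton] at hT; exact hT ▸ hPre.1)]
  simp
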